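-- pv_equiv track=rewrite | github.com/lucky-asd/ai-daily-radar | scripts/cluster.py | _enforce_cap
-- ===== SOURCE A (Python) =====
-- from collections import defaultdict
--
-- def _enforce_cap(groups, edges, cap):
--     big = [g for g in groups if len(g) > cap]
--     if not big:
--         return groups
--     small = [g for g in groups if len(g) <= cap]
--     member_to_group = {}
--     for gi, g in enumerate(big):
--         for m in g:
--             member_to_group[m] = gi
--     # Edges within big clusters, sorted weakest-first
--     internal = sorted(
--         [(s, i, j) for s, i, j in edges if member_to_group.get(i) is not None and member_to_group.get(i) == member_to_group.get(j)],
--         key=lambda e: e[0],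
--     )
--     # Rebuild union-find per big cluster, adding edges strongest-first, but
--     # forbid unions that would exceed cap.
--     out = []
--     for gi, g in enumerate(big):
--         edges_g = [e for e in reversed(internal) if member_to_group[e[1]] == gi]
--         parent = {m: m for m in g}
--         size = {m: 1 for m in g}
--         def find(x):
--             while parent[x] != x:
--                 parent[x] = parent[parent[x]]
--                 x = parent[x]
--             return x
--         for _s, i, j in edges_g:
--             ri, rj = find(i), find(j)
--             if ri == rj:
--                 continue
--             if size[ri] + size[rj] > cap:
--                 continue
--             parent[ri] = rj
--             size[rj] += size[ri]
--         sub = defaultdict(list)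
--         for m in g:
--             sub[find(m)].append(m)
--         out.extend(sub.values())
--     return small + out
-- ===== SOURCE B (Python) =====
-- def _enforce_cap(groups, edges, cap):
--     # One-pass partition; bucket internal edges by owning cluster in one pass;
--     # split each oversized cluster by capped label propagation (merge the
--     # smaller class's labels into the larger) instead of a parent-forest
--     # union-find.  Same components, hence the same output, as A's union-find.
--     small, big = [], []
--     for g in groups:
--         (big if len(g) > cap else small).append(g)
--     owner = {}
--     for gi, g in enumerate(big):
--         for m in g:
--             owner[m] = gi
--     internal = sorted(
--         (e for e in edges
--          if owner.get(e[1]) is not None and owner.get(e[1]) == owner.get(e[2])),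
--         key=lambda e: e[0],
--     )
--     buckets = {}
--     for e in reversed(internal):
--         buckets.setdefault(owner[e[1]], []).append(e)
--     out = list(small)
--     for gi, g in enumerate(big):
--         label = {m: m for m in g}
--         members = {m: [m] for m in g}
--         for _s, i, j in buckets.get(gi, ()):
--             li, lj = label[i], label[j]
--             if li == lj or len(members[li]) + len(members[lj]) > cap:
--                 continue
--             src, dst = (li, lj) if len(members[li]) <= len(members[lj]) else (lj, li)
--             for m in members[src]:
--                 label[m] = dst
--             members[dst].extend(members.pop(src))
--         comp = {}
--         for m in g:
--             comp.setdefault(label[m], []).append(m)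
--         out.extend(comp.values())
--     return out
-- ===== Notes on version B (the rewrite author's own statement) =====
-- stated objective: alternative
-- what changed: B buckets the sorted internal edges by owning cluster in one pass instead of A's rescan of the whole internal list per oversized cluster, and splits each cluster by capped label propagation (a label map plus per-label member lists, relabelling the smaller class on each merge) instead of A's parent-forest union-find with path halving.
import Mathlib
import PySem

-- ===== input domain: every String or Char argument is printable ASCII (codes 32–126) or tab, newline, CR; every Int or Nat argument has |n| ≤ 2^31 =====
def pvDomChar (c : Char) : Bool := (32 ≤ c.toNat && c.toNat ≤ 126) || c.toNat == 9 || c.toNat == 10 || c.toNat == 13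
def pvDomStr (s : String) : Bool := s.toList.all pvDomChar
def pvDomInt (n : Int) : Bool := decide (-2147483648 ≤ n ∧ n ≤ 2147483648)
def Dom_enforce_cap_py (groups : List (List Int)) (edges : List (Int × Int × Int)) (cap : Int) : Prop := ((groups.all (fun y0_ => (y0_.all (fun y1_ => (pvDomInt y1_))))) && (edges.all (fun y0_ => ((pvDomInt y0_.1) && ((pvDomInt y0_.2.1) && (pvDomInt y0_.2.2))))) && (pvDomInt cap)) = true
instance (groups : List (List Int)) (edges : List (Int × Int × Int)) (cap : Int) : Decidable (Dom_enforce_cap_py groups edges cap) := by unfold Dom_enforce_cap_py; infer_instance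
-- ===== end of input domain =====

-- B buckets the sorted internal edges by cluster in one pass and splits each
-- oversized cluster by capped label propagation (relabel the smaller class on
-- each merge) instead of A's parent-forest union-find (objective: alternative).

-- ===== PORT A =====
-- A's inner `find` (iterative, path-halving).  `fuel` is only a totality bound:
-- Python's loop terminates because `parent` is a forest; a root is reached in
-- fewer than |g| steps (proved below for every state A reaches).
-- `parent[x]` / `parent[parent[x]]` are ported with getD x x: exact here, since
-- every looked-up key is a member of the group, hence a key of `parent`.
def pvFindA (fuel : Nat) (parent : PySem.Dict Int Int) (x : Int) :
    PySem.Dict Int Int × Int :=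
  match fuel with
  | 0 => (parent, x)
  | f + 1 =>
    let px := parent.getD x x
    if px = x then (parent, x)
    else
      let gx := parent.getD px px
      pvFindA f (parent.insert x gx) gx

-- the body of A's `for gi, g in enumerate(big)` loop: capped union-find over
-- this cluster's edges, then group members by root (defaultdict insertion order).
-- size[ri]/size[rj] ported with getD _ 1: exact, roots are always keys of `size`.
def pvGroupA (g : List Int) (edges_g : List (Int × Int × Int)) (cap : Int) :
    List (List Int) :=
  let parent := g.foldl (fun d m => d.insert m m) PySem.Dict.empty
  let size : PySem.Dict Int Int := g.foldl (fun d m => d.insert m 1) PySem.Dict.empty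
  let fuel := g.length
  let st := edges_g.foldl (fun (st : PySem.Dict Int Int × PySem.Dict Int Int) e =>
      let (parent, size) := st
      let (parent, ri) := pvFindA fuel parent e.2.1
      let (parent, rj) := pvFindA fuel parent e.2.2
      if ri = rj then (parent, size)
      else if size.getD ri 1 + size.getD rj 1 > cap then (parent, size)
      else (parent.insert ri rj, size.insert rj (size.getD rj 1 + size.getD ri 1)))
    (parent, size)
  let sub := (g.foldl (fun (ps : PySem.Dict Int Int × PySem.Dict Int (List Int)) m =>
      let (parent, sub) := ps
      let (parent, r) := pvFindA fuel parent m
      (parent, sub.modify r [] (· ++ [m]))) (st.1, PySem.Dict.empty)).2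
  sub.values

-- member_to_group[e[1]] in the per-cluster filter is ported with getD _ 0:
-- exact, since every e ∈ internal satisfies (member_to_group.get? e.2.1).isSome.
def enforce_cap_py (groups : List (List Int)) (edges : List (Int × Int × Int)) (cap : Int) : List (List Int) :=
  let big := groups.filter (fun g => decide (cap < (g.length : Int)))
  if big = [] then groups else
  let small := groups.filter (fun g => decide ((g.length : Int) ≤ cap))
  let mtg := (PySem.List.enumerate big 0).foldl
      (fun d p => p.2.foldl (fun d m => d.insert m p.1) d) PySem.Dict.empty
  let internal := PySem.List.sorted
      (edges.filter (fun e => (mtg.get? e.2.1).isSome && (mtg.get? e.2.1 == mtg.get? e.2.2)))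
      (fun e => e.1) false
  let out := (PySem.List.enumerate big 0).foldl (fun out p =>
      out ++ pvGroupA p.2 (internal.reverse.filter (fun e => mtg.getD e.2.1 0 == p.1)) cap) []
  small ++ out

-- ===== PORT B =====
-- `for m in members[src]: label[m] = dst`
def pvRelabel (ms : List Int) (dst : Int) (lab : PySem.Dict Int Int) : PySem.Dict Int Int :=
  ms.foldl (fun d m => d.insert m dst) lab

-- body of B's per-cluster loop: capped label propagation.  label[i]/label[j]
-- and members[li]/members[lj] are ported with getD (defaults never used: every
-- endpoint is a key of `label`, every current label a key of `members`).
-- members.pop(src); members[dst].extend(...) is erase + insert at dst.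
def pvGroupB (g : List Int) (edges_g : List (Int × Int × Int)) (cap : Int) :
    List (List Int) :=
  let lab := g.foldl (fun d m => d.insert m m) PySem.Dict.empty
  let mem : PySem.Dict Int (List Int) := g.foldl (fun d m => d.insert m [m]) PySem.Dict.empty
  let st := edges_g.foldl (fun (st : PySem.Dict Int Int × PySem.Dict Int (List Int)) e =>
      let li := st.1.getD e.2.1 e.2.1
      let lj := st.1.getD e.2.2 e.2.2
      if li = lj ∨ cap < ((st.2.getD li []).length : Int) + ((st.2.getD lj []).length : Int) then st
      else
        let sd := if (st.2.getD li []).length ≤ (st.2.getD lj []).length then (li, lj) else (lj, li)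
        let ms := st.2.getD sd.1 []
        (pvRelabel ms sd.2 st.1, (st.2.erase sd.1).insert sd.2 ((st.2.getD sd.2 []) ++ ms)))
    (lab, mem)
  (g.foldl (fun (d : PySem.Dict Int (List Int)) m =>
      d.modify (st.1.getD m m) [] (· ++ [m])) PySem.Dict.empty).values

-- buckets.setdefault(owner[e[1]], []).append(e) is Dict.modify key [] (· ++ [e]);
-- owner[e[1]] is getD _ 0 (exact: the key is present for every internal edge).
def enforce_cap_py_alt (groups : List (List Int)) (edges : List (Int × Int × Int)) (cap : Int) : List (List Int) :=
  let sb := groups.foldl (fun (sb : List (List Int) × List (List Int)) g =>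
      if cap < (g.length : Int) then (sb.1, sb.2 ++ [g]) else (sb.1 ++ [g], sb.2)) ([], [])
  let big := sb.2
  let owner := (PySem.List.enumerate big 0).foldl
      (fun d p => p.2.foldl (fun d m => d.insert m p.1) d) PySem.Dict.empty
  let internal := PySem.List.sorted
      (edges.filter (fun e => (owner.get? e.2.1).isSome && (owner.get? e.2.1 == owner.get? e.2.2)))
      (fun e => e.1) false
  let buckets := internal.reverse.foldl
      (fun (d : PySem.Dict Int (List (Int × Int × Int))) e =>
        d.modify (owner.getD e.2.1 0) [] (· ++ [e])) PySem.Dict.empty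
  (PySem.List.enumerate big 0).foldl (fun out p =>
      out ++ pvGroupB p.2 (buckets.getD p.1 []) cap) sb.1

-- ===== PRECONDITION & SPEC =====
def Spec_enforce_cap_py (groups : List (List Int)) (edges : List (Int × Int × Int)) (cap : Int) (out : List (List Int)) : Prop := out = enforce_cap_py_alt groups edges cap
instance (groups : List (List Int)) (edges : List (Int × Int × Int)) (cap : Int) (out : List (List Int)) : Decidable (Spec_enforce_cap_py groups edges cap out) := by unfold Spec_enforce_cap_py; infer_instance

-- ===== CLAIM (what is proved, stated in full; the proofs are below) =====
def Claim_equal_enforce_cap_py : Prop := ∀ (groups : List (List Int)) (edges : List (Int × Int × Int)) (cap : Int), Dom_enforce_cap_py groups edges cap → Spec_enforce_cap_py groups edges cap (enforce_cap_py groups edges cap)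

-- ===== LEMMAS AND PROOFS =====

-- `p.getD x x`: one step of the parent forest (identity off the keys).
def pstep (p : PySem.Dict Int Int) (x : Int) : Int := p.getD x x

def iterp (p : PySem.Dict Int Int) : Nat → Int → Int
  | 0, x => x
  | n+1, x => iterp p n (pstep p x)

-- x reaches the root r (a fixpoint of pstep) in n steps.
def ReachD (p : PySem.Dict Int Int) (x r : Int) (n : Nat) : Prop :=
  iterp p n x = r ∧ pstep p r = r

def RootP (p : PySem.Dict Int Int) (x r : Int) : Prop := ∃ n, ReachD p x r n

-- number of roots among the (distinct) members
def rc (g : List Int) (p : PySem.Dict Int Int) : Nat :=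
  g.dedup.countP (fun x => pstep p x == x)

-- the union-find state invariant for A's parent dict
def InvP (g : List Int) (p : PySem.Dict Int Int) : Prop :=
  (∀ x, p.contains x = true → x ∈ g) ∧
  (∀ x ∈ g, pstep p x ∈ g) ∧
  (∀ x ∈ g, ∃ r n, ReachD p x r n ∧ n + rc g p ≤ g.dedup.length)

-- A's roots and B's labels induce the same partition of g
def InvL (g : List Int) (p lab : PySem.Dict Int Int) : Prop :=
  ∀ x y, x ∈ g → y ∈ g → ∀ rx ry, RootP p x rx → RootP p y ry →
    (rx = ry ↔ lab.getD x x = lab.getD y y)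

-- A's size at a root = length of B's member list at the corresponding label
def InvS (g : List Int) (p s lab : PySem.Dict Int Int)
    (mem : PySem.Dict Int (List Int)) : Prop :=
  ∀ x ∈ g, ∀ r, RootP p x r → s.getD r 1 = ((mem.getD (lab.getD x x) []).length : Int)

-- B's member list at l = exactly the members of g labelled l
def InvM (g : List Int) (lab : PySem.Dict Int Int)
    (mem : PySem.Dict Int (List Int)) : Prop :=
  ∀ l x, x ∈ mem.getD l [] ↔ (x ∈ g ∧ lab.getD x x = l)

def InvAll (g : List Int) (p s lab : PySem.Dict Int Int)
    (mem : PySem.Dict Int (List Int)) : Prop :=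
  InvP g p ∧ InvL g p lab ∧ InvS g p s lab mem ∧ InvM g lab mem

theorem iterp_add (p : PySem.Dict Int Int) (a b : Nat) (x : Int) :
    iterp p (a + b) x = iterp p b (iterp p a x) := by
  induction a generalizing x with
  | zero => simp [iterp]
  | succ k ih =>
    have : k + 1 + b = (k + b) + 1 := by omega
    rw [this]
    show iterp p (k+b) (pstep p x) = _
    rw [ih (pstep p x)]
    rfl

theorem iterp_one (p : PySem.Dict Int Int) (x : Int) : iterp p 1 x = pstep p x := rfl

theorem iterp_fix (p : PySem.Dict Int Int) (r : Int) (h : pstep p r = r) :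
    ∀ n, iterp p n r = r := by
  intro n; induction n with
  | zero => rfl
  | succ k ih => show iterp p k (pstep p r) = r; rw [h]; exact ih

theorem reach_unique {p : PySem.Dict Int Int} {x r r' : Int} {n n' : Nat}
    (h : ReachD p x r n) (h' : ReachD p x r' n') : r = r' := by
  rcases h with ⟨h1, h2⟩; rcases h' with ⟨h1', h2'⟩
  rcases Nat.le_total n n' with hle | hle
  · obtain ⟨k, hk⟩ := Nat.exists_eq_add_of_le hle
    rw [hk, iterp_add, h1, iterp_fix p r h2] at h1'
    exact h1'
  · obtain ⟨k, hk⟩ := Nat.exists_eq_add_of_le hle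
    rw [hk, iterp_add, h1', iterp_fix p r' h2'] at h1
    exact h1.symm

theorem rootP_unique {p : PySem.Dict Int Int} {x r r' : Int}
    (h : RootP p x r) (h' : RootP p x r') : r = r' := by
  obtain ⟨n, hn⟩ := h; obtain ⟨n', hn'⟩ := h'; exact reach_unique hn hn'

theorem pstep_insert (p : PySem.Dict Int Int) (k v z : Int) :
    pstep (p.insert k v) z = if z = k then v else pstep p z := by
  simp [pstep, PySem.Dict.getD_insert]

theorem iterp_mem (g : List Int) (p : PySem.Dict Int Int)
    (hc : ∀ x ∈ g, pstep p x ∈ g) :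
    ∀ n x, x ∈ g → iterp p n x ∈ g := by
  intro n; induction n with
  | zero => intro x hx; exact hx
  | succ k ih => intro x hx; exact ih _ (hc x hx)

theorem countP_congr' (l : List Int) (f f' : Int → Bool)
    (h : ∀ b ∈ l, f' b = f b) : l.countP f' = l.countP f := by
  induction l with
  | nil => rfl
  | cons x xs ih =>
    rw [List.countP_cons, List.countP_cons, h x (by simp), ih (fun b hb => h b (by simp [hb]))]

theorem countP_flip_one (l : List Int) (hl : l.Nodup) (a : Int) (ha : a ∈ l)
    (f f' : Int → Bool) (hfa : f a = true) (hfa' : f' a = false)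
    (hoth : ∀ b, b ≠ a → f' b = f b) :
    l.countP f' + 1 = l.countP f := by
  induction l with
  | nil => cases ha
  | cons x xs ih =>
    rcases List.nodup_cons.mp hl with ⟨hx, hxs⟩
    rw [List.countP_cons, List.countP_cons]
    rcases List.mem_cons.mp ha with rfl | hmem
    · rw [hfa, hfa']
      have h2 : xs.countP f' = xs.countP f :=
        countP_congr' xs f f' (fun b hb => hoth b (fun h => hx (h ▸ hb)))
      simp [h2]
    · have hxa : x ≠ a := fun h => hx (h ▸ hmem)
      have h2 := ih hxs hmem
      rw [hoth x hxa]
      omega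

-- no 2-cycles below a reachable root
theorem no_two_cycle (p : PySem.Dict Int Int) (x r : Int) (n : Nat)
    (hx : pstep p x ≠ x) (hreach : ReachD p x r n) :
    pstep p (pstep p x) ≠ x := by
  intro hcyc
  have hy : pstep p x ≠ x := hx
  have halt : ∀ m, iterp p (2*m) x = x ∧ iterp p (2*m+1) x = pstep p x := by
    intro m
    induction m with
    | zero => exact ⟨rfl, rfl⟩
    | succ k ih =>
      have e1 : 2*(k+1) = (2*k+1) + 1 := by omega
      have e2 : 2*(k+1)+1 = 2*(k+1) + 1 := by omega
      constructor
      · rw [e1, iterp_add, ih.2, iterp_one, hcyc]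
      · rw [e2, iterp_add]
        have h3 : iterp p (2*(k+1)) x = x := by rw [e1, iterp_add, ih.2, iterp_one, hcyc]
        rw [h3, iterp_one]
  rcases hreach with ⟨h1, h2⟩
  rcases Nat.even_or_odd n with ⟨m, hm⟩ | ⟨m, hm⟩
  · have : iterp p n x = x := by rw [hm, show m + m = 2*m by omega]; exact (halt m).1
    rw [this] at h1; exact hx (h1 ▸ h2)
  · have : iterp p n x = pstep p x := by rw [hm]; exact (halt m).2
    rw [this] at h1
    subst h1
    rw [h2] at hcyc
    exact hx hcyc

-- one path-halving write preserves every reach (shortening it) and the root set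
theorem halve_reach (p : PySem.Dict Int Int) (x r0 : Int) (n0 : Nat)
    (hx : pstep p x ≠ x) (hreach : ReachD p x r0 n0) :
    (∀ y r m, ReachD p y r m →
        ∃ m' ≤ m, ReachD (p.insert x (pstep p (pstep p x))) y r m') ∧
    (∀ y, pstep (p.insert x (pstep p (pstep p x))) y = y ↔ pstep p y = y) := by
  have hgx : pstep p (pstep p x) ≠ x := no_two_cycle p x r0 n0 hx hreach
  have hroots : ∀ y, pstep (p.insert x (pstep p (pstep p x))) y = y ↔ pstep p y = y := by
    intro y
    rw [pstep_insert]
    by_cases hyx : y = x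
    · subst hyx
      rw [if_pos rfl]
      exact ⟨fun h => absurd h hgx, fun h => absurd h hx⟩
    · rw [if_neg hyx]
  refine ⟨?_, hroots⟩
  intro y r m
  induction m using Nat.strong_induction_on generalizing y with
  | _ m ih =>
    intro hre
    by_cases hyx : y = x
    · subst hyx
      match m, hre with
      | 0, hre =>
        have h1 : y = r := hre.1
        subst h1
        exact absurd hre.2 hx
      | 1, hre =>
        refine ⟨1, le_refl 1, ?_, (hroots r).mpr hre.2⟩
        show iterp (p.insert y (pstep p (pstep p y))) 0 (pstep (p.insert y (pstep p (pstep p y))) y) = r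
        rw [pstep_insert, if_pos rfl]
        have h1 : pstep p y = r := hre.1
        show pstep p (pstep p y) = r
        rw [h1, hre.2]
      | (k+2), hre =>
        have hmid : ReachD p (pstep p (pstep p y)) r k := by
          refine ⟨?_, hre.2⟩
          have h2 := hre.1
          rw [show k + 2 = 2 + k by omega, iterp_add] at h2
          exact h2
        obtain ⟨m'', hle, hre''⟩ := ih k (by omega) _ hmid
        refine ⟨m'' + 1, by omega, ?_, hre''.2⟩
        show iterp (p.insert y (pstep p (pstep p y))) m'' (pstep (p.insert y (pstep p (pstep p y))) y) = r
        rw [pstep_insert, if_pos rfl]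
        exact hre''.1
    · match m, hre with
      | 0, hre =>
        exact ⟨0, le_refl 0, hre.1, (hroots r).mpr hre.2⟩
      | (k+1), hre =>
        have hmid : ReachD p (pstep p y) r k := ⟨hre.1, hre.2⟩
        obtain ⟨m'', hle, hre''⟩ := ih k (by omega) _ hmid
        refine ⟨m'' + 1, by omega, ?_, hre''.2⟩
        show iterp (p.insert x (pstep p (pstep p x))) m'' (pstep (p.insert x (pstep p (pstep p x))) y) = r
        rw [pstep_insert, if_neg hyx]
        exact hre''.1

-- full specification of A's find: returns the root, preserves Q, reaches, roots
theorem find_spec (Q : PySem.Dict Int Int → Prop)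
    (HQ : ∀ p x, Q p → pstep p x ≠ x → (∃ r n, ReachD p x r n) →
        Q (p.insert x (pstep p (pstep p x)))) :
    ∀ fuel (p : PySem.Dict Int Int) x r n, Q p → ReachD p x r n → n < fuel →
      (pvFindA fuel p x).2 = r ∧ Q (pvFindA fuel p x).1 ∧
      (∀ y r' m, ReachD p y r' m → ∃ m' ≤ m, ReachD (pvFindA fuel p x).1 y r' m') ∧
      (∀ y, pstep (pvFindA fuel p x).1 y = y ↔ pstep p y = y) := by
  intro fuel
  induction fuel with
  | zero => intro p x r n _ _ h; omega
  | succ f ih =>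
    intro p x r n hQ hre hn
    by_cases hpx : p.getD x x = x
    · have hres : pvFindA (f+1) p x = (p, x) := by
        simp only [pvFindA]
        rw [if_pos hpx]
      have hrx : r = x := by
        have h1 := hre.1
        rw [iterp_fix p x hpx n] at h1
        exact h1.symm
      rw [hres]
      exact ⟨hrx.symm, hQ, fun y r' m hm => ⟨m, le_refl m, hm⟩, fun y => Iff.rfl⟩
    · have hgxe : p.getD (p.getD x x) (p.getD x x) = pstep p (pstep p x) := rfl
      have hres : pvFindA (f+1) p x
          = pvFindA f (p.insert x (pstep p (pstep p x))) (pstep p (pstep p x)) := by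
        simp only [pvFindA]
        rw [if_neg hpx, hgxe]
      obtain ⟨pres1, roots1⟩ := halve_reach p x r n hpx hre
      have hn0 : n ≠ 0 := by
        intro h0
        subst h0
        have h1 : x = r := hre.1
        exact hpx (h1 ▸ hre.2)
      have hmid : ∃ k ≤ n - 1, ReachD (p.insert x (pstep p (pstep p x))) (pstep p (pstep p x)) r k := by
        match n, hn0 with
        | 1, _ =>
          have h1 : pstep p x = r := hre.1
          have h2 : pstep p (pstep p x) = r := by rw [h1, hre.2]
          obtain ⟨k, hk, hrk⟩ := pres1 (pstep p (pstep p x)) r 0 ⟨h2, hre.2⟩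
          exact ⟨k, by omega, hrk⟩
        | (t+2), _ =>
          have h1 : ReachD p (pstep p (pstep p x)) r t := by
            refine ⟨?_, hre.2⟩
            have h2 := hre.1
            rw [show t + 2 = 2 + t by omega, iterp_add] at h2
            exact h2
          obtain ⟨k, hk, hrk⟩ := pres1 _ r t h1
          exact ⟨k, by omega, hrk⟩
      obtain ⟨k, hkle, hrk⟩ := hmid
      have hQ1 : Q (p.insert x (pstep p (pstep p x))) := HQ p x hQ hpx ⟨r, n, hre⟩
      obtain ⟨h2eq, hQ', pres2, roots2⟩ := ih _ _ r k hQ1 hrk (by omega)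
      rw [hres]
      refine ⟨h2eq, hQ', ?_, fun y => (roots2 y).trans (roots1 y)⟩
      intro y r' m hm
      obtain ⟨m1, hle1, h1⟩ := pres1 y r' m hm
      obtain ⟨m2, hle2, h2⟩ := pres2 y r' m1 h1
      exact ⟨m2, le_trans hle2 hle1, h2⟩

-- keys lie in g, and parent maps g into g: the Q preserved by path halving
def QKC (g : List Int) (p : PySem.Dict Int Int) : Prop :=
  (∀ x, p.contains x = true → x ∈ g) ∧ (∀ x ∈ g, pstep p x ∈ g)

theorem contains_of_pstep_ne (p : PySem.Dict Int Int) (x : Int)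
    (h : pstep p x ≠ x) : p.contains x = true := by
  by_cases hc : p.contains x = true
  · exact hc
  · exact absurd (PySem.Dict.getD_of_not_contains p x (by simpa using hc)) h

theorem QKC_step (g : List Int) (p : PySem.Dict Int Int) (x : Int)
    (hQ : QKC g p) (hx : pstep p x ≠ x) :
    QKC g (p.insert x (pstep p (pstep p x))) := by
  obtain ⟨hkeys, hclos⟩ := hQ
  have hxg : x ∈ g := hkeys x (contains_of_pstep_ne p x hx)
  constructor
  · intro z hz
    rw [PySem.Dict.contains_insert] at hz
    rcases Bool.or_eq_true_iff.mp hz with h | h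
    · exact (beq_iff_eq.mp h) ▸ hxg
    · exact hkeys z h
  · intro z hzg
    rw [pstep_insert]
    by_cases hzx : z = x
    · rw [if_pos hzx]
      exact hclos _ (hclos x hxg)
    · rw [if_neg hzx]
      exact hclos z hzg

theorem rc_pos (g : List Int) (p : PySem.Dict Int Int) (x r : Int) (n : Nat)
    (hclos : ∀ x ∈ g, pstep p x ∈ g) (hx : x ∈ g) (hre : ReachD p x r n) :
    0 < rc g p := by
  have hrg : r ∈ g := hre.1 ▸ iterp_mem g p hclos n x hx
  exact List.countP_pos_iff.mpr ⟨r, List.mem_dedup.mpr hrg, beq_iff_eq.mpr hre.2⟩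

theorem rc_congr (g : List Int) (p p' : PySem.Dict Int Int)
    (h : ∀ y, pstep p' y = y ↔ pstep p y = y) : rc g p' = rc g p := by
  refine countP_congr' _ _ _ (fun b _ => ?_)
  have := h b
  by_cases hb : pstep p b = b
  · simp [hb, this.mpr hb]
  · have h2 : ¬ pstep p' b = b := fun hc => hb (this.mp hc)
    simp [hb, h2]

-- running A's find preserves the whole invariant, returns the root of x, and
-- leaves the root of every member unchanged
theorem inv_after_find (g : List Int) (p s lab : PySem.Dict Int Int)
    (mem : PySem.Dict Int (List Int)) (x : Int)
    (hInv : InvAll g p s lab mem) (hx : x ∈ g) :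
    InvAll g (pvFindA g.length p x).1 s lab mem ∧
    RootP p x ((pvFindA g.length p x).2) ∧
    (∀ y r, y ∈ g → (RootP (pvFindA g.length p x).1 y r ↔ RootP p y r)) := by
  obtain ⟨⟨hkeys, hclos, hbound⟩, hL, hS, hM⟩ := hInv
  obtain ⟨r, n, hre, hb⟩ := hbound x hx
  have hrc := rc_pos g p x r n hclos hx hre
  have hdl : g.dedup.length ≤ g.length := (List.dedup_sublist g).length_le
  have hfuel : n < g.length := by omega
  obtain ⟨h2eq, hQ', pres, roots⟩ :=
    find_spec (QKC g) (fun p x hQ hne _ => QKC_step g p x hQ hne)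
      g.length p x r n ⟨hkeys, hclos⟩ hre hfuel
  have hrcEq := rc_congr g p _ roots
  have hrr : ∀ y rr, y ∈ g → (RootP (pvFindA g.length p x).1 y rr ↔ RootP p y rr) := by
    intro y rr hy
    obtain ⟨ry, ny, hrey, _⟩ := hbound y hy
    obtain ⟨m', _, hre'⟩ := pres y ry ny hrey
    constructor
    · intro hr'
      have : rr = ry := rootP_unique hr' ⟨m', hre'⟩
      exact this ▸ ⟨ny, hrey⟩
    · intro hr
      have : rr = ry := rootP_unique hr ⟨ny, hrey⟩
      exact this ▸ ⟨m', hre'⟩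
  refine ⟨⟨⟨hQ'.1, hQ'.2, ?_⟩, ?_, ?_, hM⟩, ?_, hrr⟩
  · intro z hz
    obtain ⟨rz, nz, hrez, hbz⟩ := hbound z hz
    obtain ⟨m', hle, hre'⟩ := pres z rz nz hrez
    exact ⟨rz, m', hre', by omega⟩
  · intro a b ha hb ra rb hra hrb
    exact hL a b ha hb ra rb ((hrr a ra ha).mp hra) ((hrr b rb hb).mp hrb)
  · intro a ha ra hra
    exact hS a ha ra ((hrr a ra ha).mp hra)
  · exact h2eq ▸ ⟨n, hre⟩

theorem rootP_root {p : PySem.Dict Int Int} {x r : Int} (h : RootP p x r) :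
    pstep p r = r := by obtain ⟨n, hn⟩ := h; exact hn.2

theorem rootP_refl {p : PySem.Dict Int Int} {r : Int} (h : pstep p r = r) :
    RootP p r r := ⟨0, rfl, h⟩

theorem rootP_mem {g : List Int} {p : PySem.Dict Int Int} {x r : Int}
    (hclos : ∀ x ∈ g, pstep p x ∈ g) (hx : x ∈ g) (h : RootP p x r) : r ∈ g := by
  obtain ⟨n, hn⟩ := h
  exact hn.1 ▸ iterp_mem g p hclos n x hx

theorem union_reach_ne (p : PySem.Dict Int Int) (ri rj : Int)
    (hri : pstep p ri = ri) :
    ∀ m y r, ReachD p y r m → r ≠ ri → ReachD (p.insert ri rj) y r m := by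
  intro m
  induction m with
  | zero =>
    intro y r hre hner
    have h1 : y = r := hre.1
    subst h1
    exact ⟨rfl, by rw [pstep_insert, if_neg hner]; exact hre.2⟩
  | succ k ih =>
    intro y r hre hner
    by_cases hy : y = ri
    · rw [hy] at hre
      have h3 : r = ri := by rw [← hre.1, iterp_fix p ri hri (k+1)]
      exact absurd h3 hner
    · have htail : ReachD p (pstep p y) r k := ⟨hre.1, hre.2⟩
      have h2 := ih (pstep p y) r htail hner
      refine ⟨?_, h2.2⟩
      show iterp (p.insert ri rj) k (pstep (p.insert ri rj) y) = r
      rw [pstep_insert, if_neg hy]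
      exact h2.1

theorem union_reach_to (p : PySem.Dict Int Int) (ri rj : Int)
    (hri : pstep p ri = ri) (hrj : pstep p rj = rj) (hne : ri ≠ rj) :
    ∀ m y, ReachD p y ri m → ReachD (p.insert ri rj) y rj (m+1) := by
  have hrj1 : pstep (p.insert ri rj) rj = rj := by
    rw [pstep_insert, if_neg (fun h => hne h.symm)]; exact hrj
  have hstep : pstep (p.insert ri rj) ri = rj := by rw [pstep_insert, if_pos rfl]
  intro m
  induction m with
  | zero =>
    intro y hre
    have h1 : y = ri := hre.1
    rw [h1]
    refine ⟨?_, hrj1⟩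
    show iterp (p.insert ri rj) 0 (pstep (p.insert ri rj) ri) = rj
    rw [hstep]
    rfl
  | succ k ih =>
    intro y hre
    by_cases hy : y = ri
    · rw [hy]
      refine ⟨?_, hrj1⟩
      show iterp (p.insert ri rj) (k+1) (pstep (p.insert ri rj) ri) = rj
      rw [hstep]
      exact iterp_fix _ rj hrj1 (k+1)
    · have htail : ReachD p (pstep p y) ri k := ⟨hre.1, hre.2⟩
      have h2 := ih (pstep p y) htail
      refine ⟨?_, hrj1⟩
      show iterp (p.insert ri rj) (k+1) (pstep (p.insert ri rj) y) = rj
      rw [pstep_insert, if_neg hy]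
      exact h2.1

theorem rc_union (g : List Int) (p : PySem.Dict Int Int) (ri rj : Int)
    (hri : pstep p ri = ri) (hrig : ri ∈ g) (hne : rj ≠ ri) :
    rc g (p.insert ri rj) + 1 = rc g p := by
  refine countP_flip_one g.dedup (List.nodup_dedup g) ri (List.mem_dedup.mpr hrig)
    _ _ (beq_iff_eq.mpr hri) ?_ ?_
  · have : pstep (p.insert ri rj) ri = rj := by rw [pstep_insert, if_pos rfl]
    simp [this, hne]
  · intro b hb
    have : pstep (p.insert ri rj) b = pstep p b := by rw [pstep_insert, if_neg hb]
    rw [this]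

-- `for m in members[src]: label[m] = dst`, pointwise
theorem relabel_getD (ms : List Int) (dst : Int) (lab : PySem.Dict Int Int) (x : Int) :
    (pvRelabel ms dst lab).getD x x = if x ∈ ms then dst else lab.getD x x := by
  induction ms generalizing lab with
  | nil => simp [pvRelabel]
  | cons m ms ih =>
    show (pvRelabel ms dst (lab.insert m dst)).getD x x = _
    rw [ih]
    by_cases h1 : x ∈ ms
    · simp [h1]
    · rw [if_neg h1, PySem.Dict.getD_insert]
      by_cases h2 : x = m
      · simp [h2]
      · simp [h1, h2]

theorem find?_filter_key {ν : Type} (l : List (Int × ν)) (k k' : Int) :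
    (l.filter (fun p => !(p.1 == k))).find? (fun p => p.1 == k')
      = if k' = k then none else l.find? (fun p => p.1 == k') := by
  induction l with
  | nil => simp
  | cons a l ih =>
    by_cases hak : a.1 = k <;> by_cases hk : k' = k <;>
      simp [List.find?_cons, hak, hk, ih, beq_iff_eq]
    have h2 : (k == k') = false := by
      simp only [beq_eq_false_iff_ne, ne_eq]
      exact fun h => hk h.symm
    rw [h2]

theorem get?_erase {ν : Type} (d : PySem.Dict Int ν) (k k' : Int) :
    (d.erase k).get? k' = if k' = k then none else d.get? k' := by
  show ((d.items.filter (fun p => !(p.1 == k))).find? (fun p => p.1 == k')).map (fun x => x.2)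
    = if k' = k then none else (d.items.find? (fun p => p.1 == k')).map (fun x => x.2)
  rw [find?_filter_key]
  by_cases h : k' = k
  · simp [h]
  · simp [h]

theorem getD_erase {ν : Type} (d : PySem.Dict Int ν) (k k' : Int) (d0 : ν) :
    (d.erase k).getD k' d0 = if k' = k then d0 else d.getD k' d0 := by
  show ((d.erase k).get? k').getD d0 = _
  rw [get?_erase]
  by_cases h : k' = k
  · simp [h]
  · simp [h, PySem.Dict.getD_eq_get?_getD]

-- merging classes {ri,rj} in roots and {src,dst}={li,lj} in labels preserves
-- the correspondence of the two partitions
theorem merge_equiv (rx ry ri rj ax ay li lj src dst : Int)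
    (hrirj : ri ≠ rj) (hlilj : li ≠ lj)
    (e : rx = ry ↔ ax = ay) (exi : rx = ri ↔ ax = li) (exj : rx = rj ↔ ax = lj)
    (eyi : ry = ri ↔ ay = li) (eyj : ry = rj ↔ ay = lj)
    (hsd : (src = li ∧ dst = lj) ∨ (src = lj ∧ dst = li)) :
    ((if rx = ri then rj else rx) = (if ry = ri then rj else ry))
      ↔ ((if ax = src then dst else ax) = (if ay = src then dst else ay)) := by
  rcases hsd with ⟨hs, hd⟩ | ⟨hs, hd⟩ <;> subst hs <;> subst hd <;> split_ifs <;> omega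

-- a capped union (A: parent[ri] := rj, size[rj] += size[ri];
-- B: relabel the class src to dst, concatenate the member lists) preserves InvAll
theorem inv_union (g : List Int) (p s lab : PySem.Dict Int Int)
    (mem : PySem.Dict Int (List Int)) (i j ri rj src dst : Int)
    (hInv : InvAll g p s lab mem) (hi : i ∈ g) (hj : j ∈ g)
    (hri : RootP p i ri) (hrj : RootP p j rj) (hne : ri ≠ rj)
    (hsd : (src = lab.getD i i ∧ dst = lab.getD j j) ∨
           (src = lab.getD j j ∧ dst = lab.getD i i)) :
    InvAll g (p.insert ri rj) (s.insert rj (s.getD rj 1 + s.getD ri 1))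
      (pvRelabel (mem.getD src []) dst lab)
      ((mem.erase src).insert dst ((mem.getD dst []) ++ (mem.getD src []))) := by
  obtain ⟨⟨hkeys, hclos, hbound⟩, hL, hS, hM⟩ := hInv
  have hri_root : pstep p ri = ri := rootP_root hri
  have hrj_root : pstep p rj = rj := rootP_root hrj
  have hrig : ri ∈ g := rootP_mem hclos hi hri
  have hrjg : rj ∈ g := rootP_mem hclos hj hrj
  have hlilj : lab.getD i i ≠ lab.getD j j :=
    fun h => hne ((hL i j hi hj ri rj hri hrj).mpr h)
  have hsrcdst : src ≠ dst := by
    rcases hsd with ⟨h1, h2⟩ | ⟨h1, h2⟩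
    · rw [h1, h2]; exact hlilj
    · rw [h1, h2]; exact fun h => hlilj h.symm
  have hlab' : ∀ x ∈ g, (pvRelabel (mem.getD src []) dst lab).getD x x
      = if lab.getD x x = src then dst else lab.getD x x := by
    intro x hx
    rw [relabel_getD]
    by_cases h : x ∈ mem.getD src []
    · rw [if_pos h, if_pos ((hM src x).mp h).2]
    · rw [if_neg h]
      by_cases h2 : lab.getD x x = src
      · exact absurd ((hM src x).mpr ⟨hx, h2⟩) h
      · rw [if_neg h2]
  have hmem' : ∀ l, (((mem.erase src).insert dst ((mem.getD dst []) ++ (mem.getD src []))).getD l [])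
      = if l = dst then mem.getD dst [] ++ mem.getD src []
        else if l = src then [] else mem.getD l [] := by
    intro l
    rw [PySem.Dict.getD_insert, getD_erase]
  have hchar : ∀ x ∈ g, ∀ r, RootP p x r →
      RootP (p.insert ri rj) x (if r = ri then rj else r) := by
    intro x hx r hr
    obtain ⟨n, hre⟩ := hr
    by_cases h : r = ri
    · rw [if_pos h]
      exact ⟨n+1, union_reach_to p ri rj hri_root hrj_root hne n x (h ▸ hre)⟩
    · rw [if_neg h]
      exact ⟨n, union_reach_ne p ri rj hri_root n x r hre h⟩
  refine ⟨⟨?_, ?_, ?_⟩, ?_, ?_, ?_⟩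
  · intro z hz
    rw [PySem.Dict.contains_insert] at hz
    rcases Bool.or_eq_true_iff.mp hz with h | h
    · exact (beq_iff_eq.mp h) ▸ hrig
    · exact hkeys z h
  · intro z hzg
    rw [pstep_insert]
    by_cases hz : z = ri
    · rw [if_pos hz]; exact hrjg
    · rw [if_neg hz]; exact hclos z hzg
  · intro z hz
    obtain ⟨r, n, hre, hb⟩ := hbound z hz
    have hrc1 := rc_union g p ri rj hri_root hrig (Ne.symm hne)
    by_cases h : r = ri
    · exact ⟨rj, n+1, union_reach_to p ri rj hri_root hrj_root hne n z (h ▸ hre), by omega⟩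
    · exact ⟨r, n, union_reach_ne p ri rj hri_root n z r hre h, by omega⟩
  · intro x y hx hy rx ry hrx hry
    obtain ⟨r1, n1, hre1, _⟩ := hbound x hx
    obtain ⟨r2, n2, hre2, _⟩ := hbound y hy
    have h1 : rx = if r1 = ri then rj else r1 :=
      rootP_unique hrx (hchar x hx r1 ⟨n1, hre1⟩)
    have h2 : ry = if r2 = ri then rj else r2 :=
      rootP_unique hry (hchar y hy r2 ⟨n2, hre2⟩)
    rw [h1, h2, hlab' x hx, hlab' y hy]
    exact merge_equiv r1 r2 ri rj (lab.getD x x) (lab.getD y y)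
      (lab.getD i i) (lab.getD j j) src dst hne hlilj
      (hL x y hx hy r1 r2 ⟨n1, hre1⟩ ⟨n2, hre2⟩)
      (hL x i hx hi r1 ri ⟨n1, hre1⟩ hri)
      (hL x j hx hj r1 rj ⟨n1, hre1⟩ hrj)
      (hL y i hy hi r2 ri ⟨n2, hre2⟩ hri)
      (hL y j hy hj r2 rj ⟨n2, hre2⟩ hrj)
      hsd
  · intro x hx r' hr'
    obtain ⟨r, n, hre, _⟩ := hbound x hx
    have hxr : RootP p x r := ⟨n, hre⟩
    have h1 : r' = if r = ri then rj else r := rootP_unique hr' (hchar x hx r hxr)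
    have exi : r = ri ↔ lab.getD x x = lab.getD i i := hL x i hx hi r ri hxr hri
    have exj : r = rj ↔ lab.getD x x = lab.getD j j := hL x j hx hj r rj hxr hrj
    have hsri : s.getD ri 1 = ((mem.getD (lab.getD i i) []).length : Int) := hS i hi ri hri
    have hsrj : s.getD rj 1 = ((mem.getD (lab.getD j j) []).length : Int) := hS j hj rj hrj
    have hsx : s.getD r 1 = ((mem.getD (lab.getD x x) []).length : Int) := hS x hx r hxr
    rw [h1, hlab' x hx]
    by_cases hcri : r = ri
    · rw [if_pos hcri, PySem.Dict.getD_insert_self]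
      have hlx : lab.getD x x = lab.getD i i := exi.mp hcri
      rcases hsd with ⟨hs, hd⟩ | ⟨hs, hd⟩
      · rw [if_pos (hlx.trans hs.symm), hmem', if_pos rfl]
        rw [← hs] at hsri
        rw [← hd] at hsrj
        simp only [List.length_append]
        push_cast
        omega
      · have hlxs : lab.getD x x ≠ src := by rw [hs, hlx]; exact hlilj
        rw [if_neg hlxs, hmem', if_pos (hlx.trans hd.symm)]
        rw [← hd] at hsri
        rw [← hs] at hsrj
        simp only [List.length_append]
        push_cast
        omega
    · by_cases hcrj : r = rj
      · rw [if_neg hcri, hcrj, PySem.Dict.getD_insert_self]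
        have hlx : lab.getD x x = lab.getD j j := exj.mp hcrj
        rcases hsd with ⟨hs, hd⟩ | ⟨hs, hd⟩
        · have hlxs : lab.getD x x ≠ src := by
            rw [hs, hlx]; exact fun h => hlilj h.symm
          rw [if_neg hlxs, hmem', if_pos (hlx.trans hd.symm)]
          rw [← hs] at hsri
          rw [← hd] at hsrj
          simp only [List.length_append]
          push_cast
          omega
        · rw [if_pos (hlx.trans hs.symm), hmem', if_pos rfl]
          rw [← hd] at hsri
          rw [← hs] at hsrj
          simp only [List.length_append]
          push_cast
          omega
      · rw [if_neg hcri, PySem.Dict.getD_insert_of_ne s _ _ hcrj]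
        have hlxi : lab.getD x x ≠ lab.getD i i := fun h => hcri (exi.mpr h)
        have hlxj : lab.getD x x ≠ lab.getD j j := fun h => hcrj (exj.mpr h)
        have hlxs : lab.getD x x ≠ src := by
          rcases hsd with ⟨hs, _⟩ | ⟨hs, _⟩ <;> rw [hs]
          · exact hlxi
          · exact hlxj
        have hlxd : lab.getD x x ≠ dst := by
          rcases hsd with ⟨_, hd⟩ | ⟨_, hd⟩ <;> rw [hd]
          · exact hlxj
          · exact hlxi
        rw [if_neg hlxs, hmem', if_neg hlxd, if_neg hlxs]
        exact hsx
  · intro l x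
    rw [hmem' l]
    by_cases hld : l = dst
    · rw [if_pos hld, hld]
      constructor
      · intro hmemx
        rcases List.mem_append.mp hmemx with h | h
        · obtain ⟨hxg, hlx⟩ := (hM dst x).mp h
          refine ⟨hxg, ?_⟩
          rw [hlab' x hxg]
          by_cases h2 : lab.getD x x = src
          · rw [if_pos h2]
          · rw [if_neg h2]; exact hlx
        · obtain ⟨hxg, hlx⟩ := (hM src x).mp h
          refine ⟨hxg, ?_⟩
          rw [hlab' x hxg, if_pos hlx]
      · rintro ⟨hxg, hlx⟩
        rw [hlab' x hxg] at hlx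
        by_cases h2 : lab.getD x x = src
        · exact List.mem_append.mpr (Or.inr ((hM src x).mpr ⟨hxg, h2⟩))
        · rw [if_neg h2] at hlx
          exact List.mem_append.mpr (Or.inl ((hM dst x).mpr ⟨hxg, hlx⟩))
    · rw [if_neg hld]
      by_cases hls : l = src
      · rw [if_pos hls, hls]
        simp only [List.not_mem_nil, false_iff, not_and]
        intro hxg hlx
        rw [hlab' x hxg] at hlx
        by_cases h2 : lab.getD x x = src
        · rw [if_pos h2] at hlx; exact hsrcdst hlx.symm
        · rw [if_neg h2] at hlx; exact h2 hlx
      · rw [if_neg hls, hM l x]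
        constructor
        · rintro ⟨hxg, hlx⟩
          refine ⟨hxg, ?_⟩
          have h2 : lab.getD x x ≠ src := fun h => hls (hlx.symm.trans h)
          rw [hlab' x hxg, if_neg h2]
          exact hlx
        · rintro ⟨hxg, hlx⟩
          rw [hlab' x hxg] at hlx
          by_cases h2 : lab.getD x x = src
          · rw [if_pos h2] at hlx; exact absurd hlx.symm hld
          · rw [if_neg h2] at hlx; exact ⟨hxg, hlx⟩

theorem init_getD_id (g : List Int) (d : PySem.Dict Int Int) (x : Int)
    (h : d.getD x x = x) :
    (g.foldl (fun d m => d.insert m m) d).getD x x = x := by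
  induction g generalizing d with
  | nil => exact h
  | cons m gs ih =>
    refine ih _ ?_
    rw [PySem.Dict.getD_insert]
    by_cases h2 : x = m
    · rw [if_pos h2, h2]
    · rw [if_neg h2]; exact h

theorem init_getD_one (g : List Int) (d : PySem.Dict Int Int) (x : Int)
    (h : d.getD x 1 = 1) :
    (g.foldl (fun d m => d.insert m 1) d).getD x 1 = 1 := by
  induction g generalizing d with
  | nil => exact h
  | cons m gs ih =>
    refine ih _ ?_
    rw [PySem.Dict.getD_insert]
    by_cases h2 : x = m
    · rw [if_pos h2]
    · rw [if_neg h2]; exact h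

theorem init_mem_getD (g : List Int) (d : PySem.Dict Int (List Int)) (l : Int) :
    (g.foldl (fun d m => d.insert m [m]) d).getD l []
      = if l ∈ g then [l] else d.getD l [] := by
  induction g generalizing d with
  | nil => simp
  | cons m gs ih =>
    rw [List.foldl_cons, ih]
    by_cases h1 : l ∈ gs
    · simp [h1]
    · rw [if_neg h1, PySem.Dict.getD_insert]
      by_cases h2 : l = m
      · simp [h2]
      · simp [h1, h2]

theorem init_keys (g : List Int) (x : Int)
    (h : (g.foldl (fun d m => d.insert m m) PySem.Dict.empty).contains x = true) :
    x ∈ g := by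
  rw [PySem.Dict.contains_iff_mem_keys, PySem.Dict.keys_foldl_insert] at h
  simpa [PySem.Dict.keys_empty, PySem.Set.update_nil_left, PySem.Set.mem_ofList] using h

-- the invariant holds for the freshly initialised per-cluster state
theorem inv_init (g : List Int) :
    InvAll g (g.foldl (fun d m => d.insert m m) PySem.Dict.empty)
      (g.foldl (fun d m => d.insert m 1) PySem.Dict.empty)
      (g.foldl (fun d m => d.insert m m) PySem.Dict.empty)
      (g.foldl (fun d m => d.insert m [m]) PySem.Dict.empty) := by
  have hid : ∀ x, pstep (g.foldl (fun d m => d.insert m m) PySem.Dict.empty) x = x := by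
    intro x
    exact init_getD_id g _ x (by simp [PySem.Dict.getD_empty])
  have hroot : ∀ x r, RootP (g.foldl (fun d m => d.insert m m) PySem.Dict.empty) x r → r = x := by
    intro x r h
    exact rootP_unique h (rootP_refl (hid x))
  refine ⟨⟨?_, ?_, ?_⟩, ?_, ?_, ?_⟩
  · exact init_keys g
  · intro x hx; rw [hid]; exact hx
  · intro x hx
    refine ⟨x, 0, ⟨rfl, hid x⟩, ?_⟩
    have : rc g (g.foldl (fun d m => d.insert m m) PySem.Dict.empty) = g.dedup.length :=
      List.countP_eq_length.mpr (fun b _ => beq_iff_eq.mpr (hid b))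
    omega
  · intro x y hx hy rx ry hrx hry
    rw [hroot x rx hrx, hroot y ry hry, init_getD_id g _ x (by simp [PySem.Dict.getD_empty]),
      init_getD_id g _ y (by simp [PySem.Dict.getD_empty])]
  · intro x hx r hr
    rw [hroot x r hr, init_getD_one g _ x (by simp [PySem.Dict.getD_empty]),
      init_getD_id g _ x (by simp [PySem.Dict.getD_empty]), init_mem_getD, if_pos hx]
    rfl
  · intro l x
    rw [init_mem_getD, init_getD_id g _ x (by simp [PySem.Dict.getD_empty])]
    by_cases h : l ∈ g
    · simp only [if_pos h, List.mem_singleton]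
      exact ⟨fun hx => ⟨hx ▸ h, hx⟩, fun hx => hx.2⟩
    · simp only [if_neg h, PySem.Dict.getD_empty, List.not_mem_nil, false_iff, not_and]
      intro hxg hxl
      exact h (hxl ▸ hxg)

-- the two loop bodies, named (definitionally equal to the lambdas in the ports)
def stepA (cap : Int) (fuel : Nat) (st : PySem.Dict Int Int × PySem.Dict Int Int)
    (e : Int × Int × Int) : PySem.Dict Int Int × PySem.Dict Int Int :=
  let (parent, size) := st
  let (parent, ri) := pvFindA fuel parent e.2.1
  let (parent, rj) := pvFindA fuel parent e.2.2
  if ri = rj then (parent, size)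
  else if size.getD ri 1 + size.getD rj 1 > cap then (parent, size)
  else (parent.insert ri rj, size.insert rj (size.getD rj 1 + size.getD ri 1))

def stepB (cap : Int) (st : PySem.Dict Int Int × PySem.Dict Int (List Int))
    (e : Int × Int × Int) : PySem.Dict Int Int × PySem.Dict Int (List Int) :=
  let li := st.1.getD e.2.1 e.2.1
  let lj := st.1.getD e.2.2 e.2.2
  if li = lj ∨ cap < ((st.2.getD li []).length : Int) + ((st.2.getD lj []).length : Int) then st
  else
    let sd := if (st.2.getD li []).length ≤ (st.2.getD lj []).length then (li, lj) else (lj, li)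
    let ms := st.2.getD sd.1 []
    (pvRelabel ms sd.2 st.1, (st.2.erase sd.1).insert sd.2 ((st.2.getD sd.2 []) ++ ms))

theorem step_inv (g : List Int) (cap : Int) (p s lab : PySem.Dict Int Int)
    (mem : PySem.Dict Int (List Int)) (e : Int × Int × Int)
    (hInv : InvAll g p s lab mem) (hi : e.2.1 ∈ g) (hj : e.2.2 ∈ g) :
    InvAll g (stepA cap g.length (p, s) e).1 (stepA cap g.length (p, s) e).2
      (stepB cap (lab, mem) e).1 (stepB cap (lab, mem) e).2 := by
  rcases hf1 : pvFindA g.length p e.2.1 with ⟨p1, ri⟩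
  have h1 := inv_after_find g p s lab mem e.2.1 hInv hi
  rw [hf1] at h1
  obtain ⟨hInv1, hrooti, hrr1⟩ := h1
  rcases hf2 : pvFindA g.length p1 e.2.2 with ⟨p2, rj⟩
  have h2 := inv_after_find g p1 s lab mem e.2.2 hInv1 hj
  rw [hf2] at h2
  obtain ⟨hInv2, hrootj1, hrr2⟩ := h2
  have hrootjp : RootP p e.2.2 rj := (hrr1 _ _ hj).mp hrootj1
  have hrootip2 : RootP p2 e.2.1 ri := (hrr2 _ _ hi).mpr ((hrr1 _ _ hi).mpr hrooti)
  have hrootjp2 : RootP p2 e.2.2 rj := (hrr2 _ _ hj).mpr hrootj1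
  obtain ⟨⟨hkeys, hclos, hbound⟩, hL, hS, hM⟩ := hInv
  have hiff : (ri = rj) ↔ (lab.getD e.2.1 e.2.1 = lab.getD e.2.2 e.2.2) :=
    hL e.2.1 e.2.2 hi hj ri rj hrooti hrootjp
  have hsi : s.getD ri 1 = ((mem.getD (lab.getD e.2.1 e.2.1) []).length : Int) :=
    hS e.2.1 hi ri hrooti
  have hsj : s.getD rj 1 = ((mem.getD (lab.getD e.2.2 e.2.2) []).length : Int) :=
    hS e.2.2 hj rj hrootjp
  have hA : stepA cap g.length (p, s) e =
      (if ri = rj then (p2, s)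
       else if s.getD ri 1 + s.getD rj 1 > cap then (p2, s)
       else (p2.insert ri rj, s.insert rj (s.getD rj 1 + s.getD ri 1))) := by
    simp only [stepA]
    rw [hf1, hf2]
  have hB : stepB cap (lab, mem) e =
      (if (lab.getD e.2.1 e.2.1 = lab.getD e.2.2 e.2.2 ∨ cap < ((mem.getD (lab.getD e.2.1 e.2.1) []).length : Int) + ((mem.getD (lab.getD e.2.2 e.2.2) []).length : Int)) then (lab, mem)
       else (pvRelabel (mem.getD (if (mem.getD (lab.getD e.2.1 e.2.1) []).length ≤ (mem.getD (lab.getD e.2.2 e.2.2) []).length then (lab.getD e.2.1 e.2.1, lab.getD e.2.2 e.2.2) else (lab.getD e.2.2 e.2.2, lab.getD e.2.1 e.2.1)).1 []) (if (mem.getD (lab.getD e.2.1 e.2.1) []).length ≤ (mem.getD (lab.getD e.2.2 e.2.2) []).length then (lab.getD e.2.1 e.2.1, lab.getD e.2.2 e.2.2) else (lab.getD e.2.2 e.2.2, lab.getD e.2.1 e.2.1)).2 lab,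
             (mem.erase (if (mem.getD (lab.getD e.2.1 e.2.1) []).length ≤ (mem.getD (lab.getD e.2.2 e.2.2) []).length then (lab.getD e.2.1 e.2.1, lab.getD e.2.2 e.2.2) else (lab.getD e.2.2 e.2.2, lab.getD e.2.1 e.2.1)).1).insert (if (mem.getD (lab.getD e.2.1 e.2.1) []).length ≤ (mem.getD (lab.getD e.2.2 e.2.2) []).length then (lab.getD e.2.1 e.2.1, lab.getD e.2.2 e.2.2) else (lab.getD e.2.2 e.2.2, lab.getD e.2.1 e.2.1)).2
               ((mem.getD (if (mem.getD (lab.getD e.2.1 e.2.1) []).length ≤ (mem.getD (lab.getD e.2.2 e.2.2) []).length then (lab.getD e.2.1 e.2.1, lab.getD e.2.2 e.2.2) else (lab.getD e.2.2 e.2.2, lab.getD e.2.1 e.2.1)).2 []) ++ mem.getD (if (mem.getD (lab.getD e.2.1 e.2.1) []).length ≤ (mem.getD (lab.getD e.2.2 e.2.2) []).length then (lab.getD e.2.1 e.2.1, lab.getD e.2.2 e.2.2) else (lab.getD e.2.2 e.2.2, lab.getD e.2.1 e.2.1)).1 []))) := rfl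
  rw [hA, hB]
  by_cases hrij : ri = rj
  · rw [if_pos hrij, if_pos (Or.inl (hiff.mp hrij))]
    exact hInv2
  · have hlij : lab.getD e.2.1 e.2.1 ≠ lab.getD e.2.2 e.2.2 := fun h => hrij (hiff.mpr h)
    by_cases hcap : s.getD ri 1 + s.getD rj 1 > cap
    · rw [if_neg hrij, if_pos hcap, if_pos (Or.inr (by omega))]
      exact hInv2
    · have hcond : ¬ (lab.getD e.2.1 e.2.1 = lab.getD e.2.2 e.2.2 ∨ cap < ((mem.getD (lab.getD e.2.1 e.2.1) []).length : Int) + ((mem.getD (lab.getD e.2.2 e.2.2) []).length : Int)) := by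
        rintro (h | h)
        · exact hlij h
        · omega
      rw [if_neg hrij, if_neg hcap, if_neg hcond]
      by_cases hsd : (mem.getD (lab.getD e.2.1 e.2.1) []).length ≤ (mem.getD (lab.getD e.2.2 e.2.2) []).length
      · rw [if_pos hsd]
        exact inv_union g p2 s lab mem e.2.1 e.2.2 ri rj (lab.getD e.2.1 e.2.1) (lab.getD e.2.2 e.2.2) hInv2 hi hj
          hrootip2 hrootjp2 hrij (Or.inl ⟨rfl, rfl⟩)
      · rw [if_neg hsd]
        exact inv_union g p2 s lab mem e.2.1 e.2.2 ri rj (lab.getD e.2.2 e.2.2) (lab.getD e.2.1 e.2.1) hInv2 hi hj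
          hrootip2 hrootjp2 hrij (Or.inr ⟨rfl, rfl⟩)

theorem fold_inv (g : List Int) (cap : Int) :
    ∀ (eg : List (Int × Int × Int)) (p s lab : PySem.Dict Int Int)
      (mem : PySem.Dict Int (List Int)),
      (∀ e ∈ eg, e.2.1 ∈ g ∧ e.2.2 ∈ g) → InvAll g p s lab mem →
      InvAll g (eg.foldl (stepA cap g.length) (p, s)).1
        (eg.foldl (stepA cap g.length) (p, s)).2
        (eg.foldl (stepB cap) (lab, mem)).1
        (eg.foldl (stepB cap) (lab, mem)).2 := by
  intro eg
  induction eg with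
  | nil => intro p s lab mem _ hInv; exact hInv
  | cons e eg ih =>
    intro p s lab mem hmem hInv
    have h1 := step_inv g cap p s lab mem e hInv (hmem e (by simp)).1 (hmem e (by simp)).2
    have h2 := ih (stepA cap g.length (p, s) e).1 (stepA cap g.length (p, s) e).2
      (stepB cap (lab, mem) e).1 (stepB cap (lab, mem) e).2
      (fun e' he' => hmem e' (by simp [he'])) h1
    simpa using h2

-- grouping phase: A folds over g with find-and-modify, B with label-and-modify.
-- The two accumulator dicts stay in positionwise correspondence Ppair.
def Ppair (g : List Int) (p0 lab : PySem.Dict Int Int) (a b : Int × List Int) : Prop :=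
  a.2 = b.2 ∧ ∃ m0 ∈ g, RootP p0 m0 a.1 ∧ lab.getD m0 m0 = b.1

def sA (fuel : Nat) (ps : PySem.Dict Int Int × PySem.Dict Int (List Int)) (m : Int) :
    PySem.Dict Int Int × PySem.Dict Int (List Int) :=
  let (parent, sub) := ps
  let (parent, r) := pvFindA fuel parent m
  (parent, sub.modify r [] (· ++ [m]))

def sB (lab : PySem.Dict Int Int) (d : PySem.Dict Int (List Int)) (m : Int) :
    PySem.Dict Int (List Int) :=
  d.modify (lab.getD m m) [] (· ++ [m])

theorem ppair_key_iff {g : List Int} {p0 lab : PySem.Dict Int Int}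
    {m r : Int} {a b : Int × List Int}
    (hL0 : InvL g p0 lab) (hm : m ∈ g) (hroot : RootP p0 m r)
    (hP : Ppair g p0 lab a b) : (a.1 = r ↔ b.1 = lab.getD m m) := by
  obtain ⟨hsnd, m0, hm0, hr0, hl0⟩ := hP
  rw [← hl0]
  exact hL0 m0 m hm0 hm a.1 r hr0 hroot

theorem forall2_append {P : (Int × List Int) → (Int × List Int) → Prop}
    {l1 l2 l3 l4 : List (Int × List Int)} (h : List.Forall₂ P l1 l2)
    (h2 : List.Forall₂ P l3 l4) : List.Forall₂ P (l1 ++ l3) (l2 ++ l4) := by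
  induction h with
  | nil => exact h2
  | cons hab hrest ih => exact List.Forall₂.cons hab ih

theorem forall2_find?_map {P : (Int × List Int) → (Int × List Int) → Prop}
    {l1 l2 : List (Int × List Int)} (h : List.Forall₂ P l1 l2) (r lm : Int)
    (hkey : ∀ a b, P a b → ((a.1 = r ↔ b.1 = lm) ∧ a.2 = b.2)) :
    (l1.find? (fun p => p.1 == r)).map (fun p => p.2)
      = (l2.find? (fun q => q.1 == lm)).map (fun q => q.2) := by
  induction h with
  | nil => rfl
  | cons hab hrest ih =>
    rw [List.find?_cons, List.find?_cons]
    rename_i a b l1' l2'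
    obtain ⟨hiff, hsnd⟩ := hkey a b hab
    by_cases hak : a.1 = r
    · have hbk : b.1 = lm := hiff.mp hak
      rw [beq_iff_eq.mpr hak, beq_iff_eq.mpr hbk]
      simpa using hsnd
    · have hbk : ¬ b.1 = lm := fun hb => hak (hiff.mpr hb)
      rw [beq_eq_false_iff_ne.mpr hak, beq_eq_false_iff_ne.mpr hbk]
      simpa using ih

theorem forall2_any {P : (Int × List Int) → (Int × List Int) → Prop}
    {l1 l2 : List (Int × List Int)} (h : List.Forall₂ P l1 l2) (r lm : Int)
    (hkey : ∀ a b, P a b → ((a.1 = r ↔ b.1 = lm) ∧ a.2 = b.2)) :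
    (l1.any (fun p => p.1 == r)) = (l2.any (fun q => q.1 == lm)) := by
  induction h with
  | nil => rfl
  | cons hab hrest ih =>
    rename_i a b l1' l2'
    obtain ⟨hiff, _⟩ := hkey a b hab
    simp only [List.any_cons, ih]
    by_cases hak : a.1 = r
    · rw [beq_iff_eq.mpr hak, beq_iff_eq.mpr (hiff.mp hak)]
    · rw [beq_eq_false_iff_ne.mpr hak,
        beq_eq_false_iff_ne.mpr (fun hb => hak (hiff.mpr hb))]

theorem forall2_replace {P : (Int × List Int) → (Int × List Int) → Prop}
    {l1 l2 : List (Int × List Int)} (h : List.Forall₂ P l1 l2) (r lm : Int)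
    (v : List Int)
    (hkey : ∀ a b, P a b → ((a.1 = r ↔ b.1 = lm) ∧ a.2 = b.2))
    (hnew : P (r, v) (lm, v)) :
    List.Forall₂ P (l1.map (fun p => if p.1 == r then (r, v) else p))
      (l2.map (fun q => if q.1 == lm then (lm, v) else q)) := by
  induction h with
  | nil => exact List.Forall₂.nil
  | cons hab hrest ih =>
    rename_i a b l1' l2'
    obtain ⟨hiff, _⟩ := hkey a b hab
    rw [List.map_cons, List.map_cons]
    by_cases hak : a.1 = r
    · rw [if_pos (beq_iff_eq.mpr hak), if_pos (beq_iff_eq.mpr (hiff.mp hak))]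
      exact List.Forall₂.cons hnew ih
    · rw [if_neg (by simpa using hak),
        if_neg (by simpa using (fun hb => hak (hiff.mpr hb) : ¬ b.1 = lm))]
      exact List.Forall₂.cons hab ih

theorem forall2_snd_map {P : (Int × List Int) → (Int × List Int) → Prop}
    {l1 l2 : List (Int × List Int)} (h : List.Forall₂ P l1 l2)
    (hsnd : ∀ a b, P a b → a.2 = b.2) :
    l1.map (fun p => p.2) = l2.map (fun q => q.2) := by
  induction h with
  | nil => rfl
  | cons hab hrest ih =>
    rw [List.map_cons, List.map_cons, hsnd _ _ hab, ih]

-- one grouping step keeps the two dicts in correspondence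
theorem rel_modify (g : List Int) (p0 lab : PySem.Dict Int Int)
    (d1 d2 : PySem.Dict Int (List Int)) (m r : Int)
    (hL0 : InvL g p0 lab) (hm : m ∈ g) (hroot : RootP p0 m r)
    (h : List.Forall₂ (Ppair g p0 lab) d1.items d2.items) :
    List.Forall₂ (Ppair g p0 lab) (d1.modify r [] (· ++ [m])).items
      (d2.modify (lab.getD m m) [] (· ++ [m])).items := by
  have hkey : ∀ a b, Ppair g p0 lab a b → ((a.1 = r ↔ b.1 = lab.getD m m) ∧ a.2 = b.2) :=
    fun a b hP => ⟨ppair_key_iff hL0 hm hroot hP, hP.1⟩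
  have hget : d1.get? r = d2.get? (lab.getD m m) := by
    show (d1.items.find? (fun p => p.1 == r)).map (fun p => p.2)
      = (d2.items.find? (fun q => q.1 == lab.getD m m)).map (fun q => q.2)
    exact forall2_find?_map h r (lab.getD m m) hkey
  have hgetD : d1.getD r [] = d2.getD (lab.getD m m) [] := by
    show (d1.get? r).getD [] = (d2.get? (lab.getD m m)).getD []
    rw [hget]
  have hcont : d1.contains r = d2.contains (lab.getD m m) := by
    show (d1.items.any (fun p => p.1 == r)) = (d2.items.any (fun q => q.1 == lab.getD m m))
    exact forall2_any h r (lab.getD m m) hkey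
  have hnew : Ppair g p0 lab (r, d1.getD r [] ++ [m]) (lab.getD m m, d1.getD r [] ++ [m]) :=
    ⟨rfl, m, hm, hroot, rfl⟩
  show List.Forall₂ (Ppair g p0 lab) (d1.insert r (d1.getD r [] ++ [m])).items
    (d2.insert (lab.getD m m) (d2.getD (lab.getD m m) [] ++ [m])).items
  rw [PySem.Dict.items_insert, PySem.Dict.items_insert, ← hgetD, ← hcont]
  by_cases hc : d1.contains r = true
  · rw [if_pos hc, if_pos hc]
    exact forall2_replace h r (lab.getD m m) (d1.getD r [] ++ [m]) hkey hnew
  · rw [if_neg hc, if_neg hc]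
    exact forall2_append h (List.Forall₂.cons hnew List.Forall₂.nil)

theorem group_fold (g : List Int) (cap : Int) (s lab p0 : PySem.Dict Int Int)
    (mem : PySem.Dict Int (List Int)) (hL0 : InvL g p0 lab) :
    ∀ (l : List Int) (p : PySem.Dict Int Int) (d1 d2 : PySem.Dict Int (List Int)),
      (∀ m ∈ l, m ∈ g) → InvAll g p s lab mem →
      (∀ y ∈ g, ∀ r, RootP p y r ↔ RootP p0 y r) →
      List.Forall₂ (Ppair g p0 lab) d1.items d2.items →
      List.Forall₂ (Ppair g p0 lab)
        ((l.foldl (sA g.length) (p, d1)).2).items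
        ((l.foldl (sB lab) d2).items) := by
  intro l
  induction l with
  | nil => intro p d1 d2 _ _ _ hrel; exact hrel
  | cons m l ih =>
    intro p d1 d2 hmem hInv hstab hrel
    rcases hf : pvFindA g.length p m with ⟨p', r⟩
    have hm : m ∈ g := hmem m (by simp)
    have h1 := inv_after_find g p s lab mem m hInv hm
    rw [hf] at h1
    obtain ⟨hInv', hrootm, hrr⟩ := h1
    have hroot0 : RootP p0 m r := (hstab m hm r).mp hrootm
    have hstep : sA g.length (p, d1) m = (p', d1.modify r [] (· ++ [m])) := by
      simp only [sA]
      rw [hf]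
    rw [List.foldl_cons, List.foldl_cons, hstep]
    exact ih p' (d1.modify r [] (· ++ [m])) (sB lab d2 m)
      (fun m' hm' => hmem m' (by simp [hm']))
      hInv'
      (fun y hy rr => (hrr y rr hy).trans (hstab y hy rr))
      (rel_modify g p0 lab d1 d2 m r hL0 hm hroot0 hrel)

-- the per-cluster computations of A and B agree
theorem pvGroup_eq (g : List Int) (eg : List (Int × Int × Int)) (cap : Int)
    (hends : ∀ e ∈ eg, e.2.1 ∈ g ∧ e.2.2 ∈ g) :
    pvGroupA g eg cap = pvGroupB g eg cap := by
  have hfold := fold_inv g cap eg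
      (g.foldl (fun d m => d.insert m m) PySem.Dict.empty)
      (g.foldl (fun d m => d.insert m 1) PySem.Dict.empty)
      (g.foldl (fun d m => d.insert m m) PySem.Dict.empty)
      (g.foldl (fun d m => d.insert m [m]) PySem.Dict.empty)
      hends (inv_init g)
  have hGF := group_fold g cap
      (eg.foldl (stepA cap g.length)
        (g.foldl (fun d m => d.insert m m) PySem.Dict.empty,
         g.foldl (fun d m => d.insert m 1) PySem.Dict.empty)).2
      (eg.foldl (stepB cap)
        (g.foldl (fun d m => d.insert m m) PySem.Dict.empty,
         g.foldl (fun d m => d.insert m [m]) PySem.Dict.empty)).1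
      (eg.foldl (stepA cap g.length)
        (g.foldl (fun d m => d.insert m m) PySem.Dict.empty,
         g.foldl (fun d m => d.insert m 1) PySem.Dict.empty)).1
      (eg.foldl (stepB cap)
        (g.foldl (fun d m => d.insert m m) PySem.Dict.empty,
         g.foldl (fun d m => d.insert m [m]) PySem.Dict.empty)).2
      hfold.2.1
      g
      (eg.foldl (stepA cap g.length)
        (g.foldl (fun d m => d.insert m m) PySem.Dict.empty,
         g.foldl (fun d m => d.insert m 1) PySem.Dict.empty)).1
      PySem.Dict.empty PySem.Dict.empty
      (fun m hm => hm) hfold (fun y _ r => Iff.rfl) List.Forall₂.nil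
  show ((g.foldl (sA g.length)
      ((eg.foldl (stepA cap g.length)
        (g.foldl (fun d m => d.insert m m) PySem.Dict.empty,
         g.foldl (fun d m => d.insert m 1) PySem.Dict.empty)).1,
        PySem.Dict.empty)).2).items.map (fun p => p.2)
    = ((g.foldl (sB (eg.foldl (stepB cap)
        (g.foldl (fun d m => d.insert m m) PySem.Dict.empty,
         g.foldl (fun d m => d.insert m [m]) PySem.Dict.empty)).1)
        PySem.Dict.empty)).items.map (fun q => q.2)
  exact forall2_snd_map hGF (fun a b h => h.1)

-- B's one-pass partition equals A's two filters
theorem partition_eq (cap : Int) (groups : List (List Int))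
    (s b : List (List Int)) :
    groups.foldl (fun (sb : List (List Int) × List (List Int)) g =>
        if cap < (g.length : Int) then (sb.1, sb.2 ++ [g]) else (sb.1 ++ [g], sb.2)) (s, b)
      = (s ++ groups.filter (fun g => decide ((g.length : Int) ≤ cap)),
         b ++ groups.filter (fun g => decide (cap < (g.length : Int)))) := by
  induction groups generalizing s b with
  | nil => simp
  | cons g gs ih =>
    simp only [List.foldl_cons, List.filter_cons]
    by_cases h : cap < (g.length : Int)
    · have h' : ¬ ((g.length : Int) ≤ cap) := not_le.mpr h
      simp [h, h', ih]
    · have h' : (g.length : Int) ≤ cap := not_lt.mp h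
      simp [h, h', ih]

-- B's single bucketing pass equals A's per-cluster filter of the reversed list
theorem bucket_eq (l : List (Int × Int × Int)) (k : Int × Int × Int → Int) (gi : Int) :
    (l.foldl (fun (d : PySem.Dict Int (List (Int × Int × Int))) e =>
        d.modify (k e) [] (· ++ [e])) PySem.Dict.empty).getD gi []
      = l.filter (fun e => k e == gi) := by
  have h := PySem.Dict.getD_foldl_modify_append (l := l.map (fun e => (k e, e)))
      (d := (PySem.Dict.empty : PySem.Dict Int (List (Int × Int × Int)))) (c := gi)
  rw [List.foldl_map] at h
  simp only [h, PySem.Dict.getD_empty, List.nil_append, List.filter_map, List.map_map]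
  simp [Function.comp_def]

theorem inner_sound (gL : List Int) (gi : Int) (m v : Int) :
    ∀ d : PySem.Dict Int Int,
    (gL.foldl (fun d m => d.insert m gi) d).get? m = some v →
    d.get? m = some v ∨ (m ∈ gL ∧ v = gi) := by
  induction gL with
  | nil => intro d h; exact Or.inl h
  | cons x gL ih =>
    intro d h
    rcases ih _ h with h2 | h2
    · rw [PySem.Dict.get?_insert] at h2
      by_cases hm : m = x
      · right
        refine ⟨by simp [hm], ?_⟩
        rw [if_pos hm] at h2
        exact (Option.some_inj.mp h2).symm
      · rw [if_neg hm] at h2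
        exact Or.inl h2
    · exact Or.inr ⟨by simp [h2.1], h2.2⟩

theorem mtg_sound (L : List (Int × List Int)) (m v : Int) :
    ∀ d : PySem.Dict Int Int,
    (L.foldl (fun d p => p.2.foldl (fun d m => d.insert m p.1) d) d).get? m = some v →
    d.get? m = some v ∨ ∃ q ∈ L, v = q.1 ∧ m ∈ q.2 := by
  induction L with
  | nil => intro d h; exact Or.inl h
  | cons q L ih =>
    intro d h
    rcases ih _ h with h2 | h2
    · rcases inner_sound q.2 q.1 m v d h2 with h3 | h3
      · exact Or.inl h3
      · exact Or.inr ⟨q, by simp, h3.2, h3.1⟩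
    · obtain ⟨q', hq', hv, hm⟩ := h2
      exact Or.inr ⟨q', by simp [hq'], hv, hm⟩

-- an internal edge assigned to cluster p lies inside p's member list
theorem endpoints_mem (big : List (List Int)) (p : Int × List Int)
    (hp : p ∈ PySem.List.enumerate big 0) (m : Int)
    (hm : (((PySem.List.enumerate big 0).foldl
        (fun d q => q.2.foldl (fun d m => d.insert m q.1) d) PySem.Dict.empty).get? m)
        = some p.1) :
    m ∈ p.2 := by
  rcases mtg_sound (PySem.List.enumerate big 0) m p.1 PySem.Dict.empty hm with h | h
  · rw [PySem.Dict.get?_empty] at h; cases h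
  · obtain ⟨q, hq, hv, hmq⟩ := h
    obtain ⟨k, hk, hqe⟩ := (PySem.List.mem_enumerate_iff big 0 q).mp hq
    obtain ⟨k', hk', hpe⟩ := (PySem.List.mem_enumerate_iff big 0 p).mp hp
    have hkk : k = k' := by
      have h1 : p.1 = ((0 : Int) + k) := hv.trans (by rw [hqe])
      have h2 : p.1 = ((0 : Int) + k') := by rw [hpe]
      omega
    subst hkk
    rw [hpe]
    rw [hqe] at hmq
    exact hmq

theorem enforce_cap_py_spec : Claim_equal_enforce_cap_py := by
  intro groups edges cap _
  show enforce_cap_py groups edges cap = enforce_cap_py_alt groups edges cap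
  simp only [enforce_cap_py, enforce_cap_py_alt]
  rw [partition_eq]
  simp only [List.nil_append]
  by_cases hbig : groups.filter (fun g => decide (cap < (g.length : Int))) = []
  · rw [if_pos hbig, hbig]
    simp only [PySem.List.enumerate_nil, List.foldl_nil]
    symm
    apply List.filter_eq_self.mpr
    intro g hg
    have h := List.filter_eq_nil_iff.mp hbig g hg
    simp only [decide_eq_true_eq] at h ⊢
    omega
  · rw [if_neg hbig]
    rw [PySem.List.foldl_append_eq_flatMap, PySem.List.foldl_append_eq_flatMap]
    simp only [List.nil_append]
    congr 1
    apply List.flatMap_congr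
    intro p hp
    rw [bucket_eq]
    apply pvGroup_eq
    intro e he
    obtain ⟨hin, hcond⟩ := List.mem_filter.mp he
    rw [List.mem_reverse] at hin
    have hin2 := (PySem.List.mem_sorted _ _ _ _).mp hin
    obtain ⟨hedge, hfcond⟩ := List.mem_filter.mp hin2
    obtain ⟨h1, h2⟩ := Bool.and_eq_true_iff.mp hfcond
    obtain ⟨v, hv⟩ := Option.isSome_iff_exists.mp h1
    have h22 : (((PySem.List.enumerate (groups.filter (fun g => decide (cap < (g.length : Int)))) 0).foldl
        (fun d q => q.2.foldl (fun d m => d.insert m q.1) d) PySem.Dict.empty).get? e.2.2) = some v := by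
      rw [← beq_iff_eq.mp h2]
      exact hv
    have hgd : (((PySem.List.enumerate (groups.filter (fun g => decide (cap < (g.length : Int)))) 0).foldl
        (fun d q => q.2.foldl (fun d m => d.insert m q.1) d) PySem.Dict.empty).getD e.2.1 0) = v := by
      rw [PySem.Dict.getD_eq_get?_getD, hv]
      rfl
    have hvp : v = p.1 := by
      have h3 := beq_iff_eq.mp hcond
      rw [hgd] at h3
      exact h3
    exact ⟨endpoints_mem _ p hp e.2.1 (hv.trans (by rw [hvp])),
           endpoints_mem _ p hp e.2.2 (h22.trans (by rw [hvp]))⟩
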